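-- pv_equiv track=rewrite | github.com/ISEglock17/ShogiGame | shogi_board.py | board_to_sfen
-- ===== SOURCE A (Python) =====
-- def board_to_sfen(board, turn="b", captured_pieces=None, move_count=1):
--     """ 盤面の駒配置をSFEN表記に変換 """
--     # 1. 盤面を表現
--     sfen_board = []
--     for row in board:
--         empty_count = 0
--         row_sfen = ""
--         for cell in row:
--             if cell.strip() == ".":
--                 empty_count += 1
--             else:
--                 if empty_count > 0:
--                     row_sfen += str(empty_count)
--                     empty_count = 0
--                 # 駒をSFEN用に変換
--                 piece = cell.strip()  # 前後のスペースを取り除く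
--                 if piece[0] == '+':
--                     row_sfen += '+'
--                     piece = piece[1]
--                 if piece.isupper():  # Player側の駒
--                     row_sfen += piece[0]
--                 else:  # Opponent側の駒は小文字
--                     row_sfen += piece[0].lower()
--         if empty_count > 0:
--             row_sfen += str(empty_count)
--         sfen_board.append(row_sfen)
--
--     # 盤面行ごとに '/' で区切る
--     sfen_board_str = "/".join(sfen_board)
--
--     # 2. 持ち駒を表現
--
--     # 3. 最終SFEN文字列を構築
--     sfen_str = f"{sfen_board_str} {turn} {captured_pieces} {move_count}"
--     return sfen_str
-- ===== SOURCE B (Python) =====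
-- # B: map each cell to a normalized SFEN token (None for empty), then
-- # run-length-encode the empty runs in a separate pass; join rows with '/'.
-- def _cell_token(cell):
--     piece = cell.strip()
--     if piece == ".":
--         return None
--     prefix = ""
--     if piece[0] == "+":
--         prefix = "+"
--         piece = piece[1]
--     ch = piece[0] if piece.isupper() else piece[0].lower()
--     return prefix + ch
--
--
-- def _encode(tokens):
--     parts = []
--     i = 0
--     n = len(tokens)
--     while i < n:
--         if tokens[i] is None:
--             j = i
--             while j < n and tokens[j] is None:
--                 j += 1
--             parts.append(str(j - i))
--             i = j
--         else:
--             parts.append(tokens[i])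
--             i += 1
--     return parts
--
--
-- def board_to_sfen(board, turn="b", captured_pieces=None, move_count=1):
--     rows = ["".join(_encode([_cell_token(c) for c in row])) for row in board]
--     return "{} {} {} {}".format("/".join(rows), turn, captured_pieces, move_count)
-- ===== Notes on version B (the rewrite author's own statement) =====
-- stated objective: idiomatic
-- what changed: Replaces A's inline empty-square counter with flush logic by a two-phase pass: map every cell to a normalized SFEN token (None for empty), then run-length-encode the empty runs in a separate recursive pass, joining per-row strings.
import Mathlib
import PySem

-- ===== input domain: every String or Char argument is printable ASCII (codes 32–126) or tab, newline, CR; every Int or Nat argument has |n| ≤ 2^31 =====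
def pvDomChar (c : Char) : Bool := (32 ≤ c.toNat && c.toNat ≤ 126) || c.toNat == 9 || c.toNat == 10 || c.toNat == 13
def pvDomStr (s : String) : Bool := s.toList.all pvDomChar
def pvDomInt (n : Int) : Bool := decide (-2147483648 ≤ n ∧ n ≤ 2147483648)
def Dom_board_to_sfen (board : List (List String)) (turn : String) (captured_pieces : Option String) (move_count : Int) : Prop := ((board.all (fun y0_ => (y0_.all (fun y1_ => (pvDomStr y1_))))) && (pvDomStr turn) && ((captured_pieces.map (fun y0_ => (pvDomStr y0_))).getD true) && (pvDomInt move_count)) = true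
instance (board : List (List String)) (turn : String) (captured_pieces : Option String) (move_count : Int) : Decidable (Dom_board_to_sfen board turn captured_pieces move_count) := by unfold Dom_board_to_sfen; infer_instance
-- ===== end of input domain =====

-- B replaces A's inline empty-square counter (with flush logic) by a two-phase pass:
-- map cells to normalized tokens, then run-length-encode the empty runs (objective: idiomatic).

-- Python str.isupper(), hand-ported: exact on the printable-ASCII domain
-- (cased chars of ASCII are the letters; true iff some cased char and no lowercase one).
def pvUpperStr (s : String) : Bool :=
  s.toList.any (fun c => c.isUpper || c.isLower) && s.toList.all (fun c => !c.isLower)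

-- ===== PORT A =====
-- one iteration of A's inner 'for cell in row' loop, state = (empty_count, row_sfen)
def pvStepA (st : Int × String) (cell : String) : Int × String :=
  let ec := st.1
  let rs := st.2
  let p := PySem.Str.strip cell
  if p = "." then (ec + 1, rs)
  else
    let rs := if ec > 0 then rs ++ PySem.Int.toStr ec else rs
    -- piece[0] / piece[1] would raise IndexError in Python when absent: Pre_ excludes that
    let (rs, piece) :=
      if PySem.Str.pyGet? p 0 = some '+' then
        (rs ++ "+", String.ofList [(PySem.Str.pyGet? p 1).getD ' '])
      else (rs, p)
    if pvUpperStr piece then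
      (0, rs ++ String.ofList [(PySem.Str.pyGet? piece 0).getD ' '])
    else
      (0, rs ++ PySem.Str.lower (String.ofList [(PySem.Str.pyGet? piece 0).getD ' ']))

def pvRowA (row : List String) : String :=
  let st := row.foldl pvStepA (0, "")
  if st.1 > 0 then st.2 ++ PySem.Int.toStr st.1 else st.2

def board_to_sfen (board : List (List String)) (turn : String) (captured_pieces : Option String) (move_count : Int) : String :=
  let sfen_board := board.foldl (fun acc row => acc ++ [pvRowA row]) []
  let sfen_board_str := PySem.Str.join "/" sfen_board
  sfen_board_str ++ " " ++ turn ++ " " ++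
    (match captured_pieces with | none => "None" | some s => s) ++ " " ++
    PySem.Int.toStr move_count

-- ===== PORT B =====
-- _cell_token: None for an empty square, else the normalized SFEN token
def pvTokenB (cell : String) : Option String :=
  let p := PySem.Str.strip cell
  if p = "." then none
  else
    let pr := if PySem.Str.pyGet? p 0 = some '+' then "+" else ""
    let piece :=
      if PySem.Str.pyGet? p 0 = some '+' then String.ofList [(PySem.Str.pyGet? p 1).getD ' ']
      else p
    let ch :=
      if pvUpperStr piece then String.ofList [(PySem.Str.pyGet? piece 0).getD ' ']
      else PySem.Str.lower (String.ofList [(PySem.Str.pyGet? piece 0).getD ' '])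
    some (pr ++ ch)

-- the 'while' in _encode counts the leading run of None
def pvCountLead : List (Option String) → Nat
  | none :: rest => pvCountLead rest + 1
  | _ => 0

-- _encode: run-length-encode the None runs
def pvEncodeB : List (Option String) → List String
  | [] => []
  | some t :: rest => t :: pvEncodeB rest
  | none :: rest =>
      PySem.Int.toStr ((pvCountLead rest + 1 : Nat) : Int) ::
        pvEncodeB (rest.drop (pvCountLead rest))
  termination_by l => l.length
  decreasing_by
    all_goals (simp [List.length_drop]; try omega)

def board_to_sfen_alt (board : List (List String)) (turn : String) (captured_pieces : Option String) (move_count : Int) : String :=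
  let rows := board.map (fun row => PySem.Str.join "" (pvEncodeB (row.map pvTokenB)))
  PySem.Str.join "/" rows ++ " " ++ turn ++ " " ++
    (match captured_pieces with | none => "None" | some s => s) ++ " " ++
    PySem.Int.toStr move_count

-- ===== PRECONDITION & SPEC =====
-- Pre_ excludes exactly the inputs where Python A raises IndexError (piece[0] on a cell
-- stripping to "", or piece[1] on a cell stripping to "+"); B raises there too.
def Pre_board_to_sfen (board : List (List String)) (turn : String) (captured_pieces : Option String) (move_count : Int) : Prop :=
  ∀ row ∈ board, ∀ cell ∈ row,
    PySem.Str.strip cell ≠ "" ∧ PySem.Str.strip cell ≠ "+"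

instance (board : List (List String)) (turn : String) (captured_pieces : Option String) (move_count : Int) : Decidable (Pre_board_to_sfen board turn captured_pieces move_count) := by unfold Pre_board_to_sfen; infer_instance

def pvWitness_board_to_sfen : List (List String) × String × Option String × Int :=
  ([["P", "."], [".", "+p"]], "b", some "-", 1)

def Spec_board_to_sfen (board : List (List String)) (turn : String) (captured_pieces : Option String) (move_count : Int) (out : String) : Prop := out = board_to_sfen_alt board turn captured_pieces move_count
instance (board : List (List String)) (turn : String) (captured_pieces : Option String) (move_count : Int) (out : String) : Decidable (Spec_board_to_sfen board turn captured_pieces move_count out) := by unfold Spec_board_to_sfen; infer_instance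

-- ===== CLAIM (what is proved, stated in full; the proofs are below) =====
def Claim_equal_board_to_sfen : Prop := ∀ (board : List (List String)) (turn : String) (captured_pieces : Option String) (move_count : Int), Dom_board_to_sfen board turn captured_pieces move_count → Pre_board_to_sfen board turn captured_pieces move_count → Spec_board_to_sfen board turn captured_pieces move_count (board_to_sfen board turn captured_pieces move_count)

-- ===== LEMMAS AND PROOFS =====

theorem pv_chars_join_nil_cons (x : List Char) (xs : List (List Char)) :
    PySem.Chars.join [] (x :: xs) = x ++ PySem.Chars.join [] xs := by
  cases xs with
  | nil => simp [PySem.Chars.join, List.intercalate]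
  | cons q rest => rw [PySem.Chars.join_cons_cons]; simp

theorem pv_join_empty_nil : PySem.Str.join "" ([] : List String) = "" := by
  apply String.toList_inj.mp
  simp [PySem.Str.toList_join, PySem.Chars.join, List.intercalate]

theorem pv_join_empty_cons (a : String) (l : List String) :
    PySem.Str.join "" (a :: l) = a ++ PySem.Str.join "" l := by
  apply String.toList_inj.mp
  simp only [PySem.Str.toList_join, List.map_cons, String.toList_append, String.toList_empty]
  rw [pv_chars_join_nil_cons]

theorem pv_countLead_some (t : String) (l : List (Option String)) :
    pvCountLead (some t :: l) = 0 := rfl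

theorem pv_countLead_none (l : List (Option String)) :
    pvCountLead (none :: l) = pvCountLead l + 1 := rfl

theorem pv_countLead_replicate (n : Nat) (l : List (Option String)) (t : String)
    : pvCountLead (List.replicate n none ++ some t :: l) = n := by
  induction n with
  | zero => simp [pv_countLead_some]
  | succ k ih => simp only [List.replicate_succ, List.cons_append, pv_countLead_none, ih]

theorem pv_countLead_replicate' (n : Nat) : pvCountLead (List.replicate n none) = n := by
  induction n with
  | zero => rfl
  | succ k ih => simp only [List.replicate_succ, pv_countLead_none, ih]

theorem pv_encode_replicate (n : Nat) :
    pvEncodeB (List.replicate n none) =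
      (if n = 0 then [] else [PySem.Int.toStr (n : Int)]) := by
  cases n with
  | zero => simp [pvEncodeB]
  | succ k =>
    rw [List.replicate_succ]
    rw [pvEncodeB]
    rw [pv_countLead_replicate']
    simp [pvEncodeB, List.drop_replicate]

theorem pv_encode_replicate_cons (n : Nat) (t : String) (l : List (Option String)) :
    pvEncodeB (List.replicate n none ++ some t :: l) =
      (if n = 0 then [] else [PySem.Int.toStr (n : Int)]) ++ t :: pvEncodeB l := by
  cases n with
  | zero => simp [pvEncodeB]
  | succ k =>
    rw [List.replicate_succ, List.cons_append]
    rw [pvEncodeB]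
    rw [pv_countLead_replicate]
    have hd : (List.replicate k (none : Option String) ++ some t :: l).drop k
        = some t :: l := by
      have := List.drop_left (l₁ := List.replicate k (none : Option String)) (l₂ := some t :: l)
      simpa using this
    rw [hd]
    simp [pvEncodeB]

theorem pv_main (cells : List String) (ec : Nat) (rs : String) :
    (let st := cells.foldl pvStepA ((ec : Int), rs)
     if st.1 > 0 then st.2 ++ PySem.Int.toStr st.1 else st.2) =
      rs ++ PySem.Str.join "" (pvEncodeB (List.replicate ec none ++ cells.map pvTokenB)) := by
  induction cells generalizing ec rs with
  | nil =>
    simp only [List.foldl_nil, List.map_nil, List.append_nil]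
    rw [pv_encode_replicate]
    by_cases h0 : ec = 0
    · subst h0; simp [pv_join_empty_nil]
    · have hpos : ((ec : Nat) : Int) > 0 := by exact_mod_cast Nat.pos_of_ne_zero h0
      rw [if_pos hpos, if_neg h0, pv_join_empty_cons, pv_join_empty_nil]
      simp
  | cons c cs ih =>
    by_cases hc : PySem.Str.strip c = "."
    · have hstep : pvStepA ((ec : Int), rs) c = ((ec : Int) + 1, rs) := by
        simp [pvStepA, hc]
      have htok : pvTokenB c = none := by simp [pvTokenB, hc]
      rw [List.foldl_cons, hstep]
      have : ((ec : Int) + 1) = (((ec + 1 : Nat)) : Int) := by push_cast; ring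
      rw [this, ih (ec + 1) rs]
      rw [List.map_cons, htok]
      rw [List.replicate_succ']
      simp [List.append_assoc]
    · -- non-empty cell: the step flushes and appends exactly the token
      obtain ⟨t, htok⟩ : ∃ t, pvTokenB c = some t := ⟨_, by
        unfold pvTokenB; rw [if_neg hc]⟩
      have hstep : pvStepA ((ec : Int), rs) c
          = (0, (if (ec : Int) > 0 then rs ++ PySem.Int.toStr (ec : Int) else rs) ++ t) := by
        unfold pvTokenB at htok
        rw [if_neg hc] at htok
        simp only [Option.some.injEq] at htok
        unfold pvStepA
        rw [if_neg hc]
        subst htok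
        split_ifs <;> simp_all [String.append_assoc]
      rw [List.foldl_cons, hstep]
      have ihx := ih 0 ((if (ec : Int) > 0 then rs ++ PySem.Int.toStr (ec : Int) else rs) ++ t)
      simp only [Nat.cast_zero, List.replicate_zero, List.nil_append] at ihx
      rw [ihx]
      rw [List.map_cons, htok, pv_encode_replicate_cons]
      by_cases h0 : ec = 0
      · subst h0; simp [pv_join_empty_cons, String.append_assoc]
      · have hpos : ((ec : Nat) : Int) > 0 := by exact_mod_cast Nat.pos_of_ne_zero h0
        rw [if_pos hpos, if_neg h0]
        simp [pv_join_empty_cons, String.append_assoc]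

theorem pv_row_eq (row : List String) :
    pvRowA row = PySem.Str.join "" (pvEncodeB (row.map pvTokenB)) := by
  have := pv_main row 0 ""
  simpa [pvRowA] using this

-- ===== VERDICT (by name: the statement is the Claim_ definition above) =====
theorem board_to_sfen_spec : Claim_equal_board_to_sfen := by
  intro board turn cp mc _ _
  unfold Spec_board_to_sfen board_to_sfen board_to_sfen_alt
  rw [PySem.List.foldl_append_singleton_eq_map]
  have hrow : pvRowA = fun row => PySem.Str.join "" (pvEncodeB (row.map pvTokenB)) :=
    funext pv_row_eq
  rw [hrow]
  simp
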